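-- pv_equiv track=rewrite | github.com/pavl-kuzkin/advent_of_code_2022 | 2022/22-monkey-map/main.py | get_shortcuts
-- ===== SOURCE A (Python) =====
-- def get_shortcuts(board, xm, ym):
--     # cache holds shortcuts to loop around the board
--     right_loop = {}
--     left_loop = {}
--     up_loop = {}
--     down_loop = {}
--
--     for y in range(ym):
--         for x in range(xm):
--             loc = (x, y)
--             if board.get(loc) is not None and right_loop.get(y) is None:
--                 right_loop[y] = loc
--
--     for y in range(ym):
--         for x in reversed(range(xm)):
--             loc = (x, y)
--             if board.get(loc) is not None and left_loop.get(y) is None: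
--                 left_loop[y] = loc
--
--     for x in range(xm):
--         for y in range(ym):
--             loc = (x, y)
--             if board.get(loc) is not None and up_loop.get(x) is None:
--                 up_loop[x] = loc
--
--     for x in range(xm):
--         for y in reversed(range(ym)):
--             loc = (x, y)
--             if board.get(loc) is not None and down_loop.get(x) is None:
--                 down_loop[x] = loc
--     return right_loop, left_loop, up_loop, down_loop
-- ===== SOURCE B (Python) =====
-- def get_shortcuts(board, xm, ym):
--     # One pass over the occupied cells, grouping x's per row and y's per column;
--     # then emit min/max per line in increasing key order (= A's insertion order).
--     rows = {}
--     cols = {}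
--     for (x, y) in board:
--         if 0 <= x < xm and 0 <= y < ym:
--             rows.setdefault(y, []).append(x)
--             cols.setdefault(x, []).append(y)
--
--     right_loop = {}
--     left_loop = {}
--     for y in sorted(rows):
--         xs = rows[y]
--         right_loop[y] = (min(xs), y)
--         left_loop[y] = (max(xs), y)
--
--     up_loop = {}
--     down_loop = {}
--     for x in sorted(cols):
--         ys = cols[x]
--         up_loop[x] = (x, min(ys))
--         down_loop[x] = (x, max(ys))
--     return right_loop, left_loop, up_loop, down_loop
-- ===== Notes on version B (the rewrite author's own statement) =====
-- stated objective: faster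
-- what changed: A makes four full O(xm*ym) grid scans keeping the first occupied cell per row/column in a cache dict; B makes one pass over the occupied cells grouping x's per row and y's per column, then emits min/max per line in sorted key order.
import Mathlib
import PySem

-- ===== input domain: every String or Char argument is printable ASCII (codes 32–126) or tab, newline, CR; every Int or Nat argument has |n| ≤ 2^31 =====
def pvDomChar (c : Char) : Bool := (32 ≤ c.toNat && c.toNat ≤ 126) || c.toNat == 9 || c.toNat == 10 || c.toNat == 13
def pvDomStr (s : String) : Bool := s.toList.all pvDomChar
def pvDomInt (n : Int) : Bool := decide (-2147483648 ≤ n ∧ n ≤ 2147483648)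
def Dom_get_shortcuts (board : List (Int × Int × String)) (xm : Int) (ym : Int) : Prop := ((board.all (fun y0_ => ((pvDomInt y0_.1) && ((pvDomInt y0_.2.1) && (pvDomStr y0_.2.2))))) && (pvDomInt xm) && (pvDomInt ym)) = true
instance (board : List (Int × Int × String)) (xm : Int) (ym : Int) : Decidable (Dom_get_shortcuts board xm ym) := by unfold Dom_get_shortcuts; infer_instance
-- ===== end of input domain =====

-- B replaces A's four O(xm*ym) grid scans by one pass over the occupied cells grouping
-- x's per row / y's per column, then emits min/max per line in sorted key order.

-- ===== PORT A =====
-- board.get((x, y)) is not None: key present; dict lookup = first match in the association list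
def pvOcc (board : List (Int × Int × String)) (x y : Int) : Bool :=
  (board.find? (fun e => e.1 == x && e.2.1 == y)).isSome

def get_shortcuts (board : List (Int × Int × String)) (xm : Int) (ym : Int) :
    (List (Int × Int × Int)) × (List (Int × Int × Int)) × (List (Int × Int × Int)) × (List (Int × Int × Int)) :=
  let right_loop : PySem.Dict Int (Int × Int) :=
    (PySem.List.pyRange 0 ym 1).foldl (fun d y =>
      (PySem.List.pyRange 0 xm 1).foldl (fun d x =>
        if pvOcc board x y && (PySem.Dict.get? d y).isNone then PySem.Dict.insert d y (x, y) else d) d)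
      PySem.Dict.empty
  let left_loop : PySem.Dict Int (Int × Int) :=
    (PySem.List.pyRange 0 ym 1).foldl (fun d y =>
      ((PySem.List.pyRange 0 xm 1).reverse).foldl (fun d x =>
        if pvOcc board x y && (PySem.Dict.get? d y).isNone then PySem.Dict.insert d y (x, y) else d) d)
      PySem.Dict.empty
  let up_loop : PySem.Dict Int (Int × Int) :=
    (PySem.List.pyRange 0 xm 1).foldl (fun d x =>
      (PySem.List.pyRange 0 ym 1).foldl (fun d y =>
        if pvOcc board x y && (PySem.Dict.get? d x).isNone then PySem.Dict.insert d x (x, y) else d) d)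
      PySem.Dict.empty
  let down_loop : PySem.Dict Int (Int × Int) :=
    (PySem.List.pyRange 0 xm 1).foldl (fun d x =>
      ((PySem.List.pyRange 0 ym 1).reverse).foldl (fun d y =>
        if pvOcc board x y && (PySem.Dict.get? d x).isNone then PySem.Dict.insert d x (x, y) else d) d)
      PySem.Dict.empty
  (right_loop.items, left_loop.items, up_loop.items, down_loop.items)

-- ===== PORT B =====
-- 0 <= x < xm and 0 <= y < ym
def pvInR (xm ym : Int) (e : Int × Int × String) : Bool :=
  decide (0 ≤ e.1) && decide (e.1 < xm) && decide (0 ≤ e.2.1) && decide (e.2.1 < ym)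

def get_shortcuts_alt (board : List (Int × Int × String)) (xm : Int) (ym : Int) :
    (List (Int × Int × Int)) × (List (Int × Int × Int)) × (List (Int × Int × Int)) × (List (Int × Int × Int)) :=
  -- one pass: rows.setdefault(y, []).append(x) = rows[y] = rows.get(y, []) + [x], i.e. Dict.modify
  let rc : PySem.Dict Int (List Int) × PySem.Dict Int (List Int) :=
    board.foldl (fun p e =>
      if pvInR xm ym e then
        (p.1.modify e.2.1 [] (· ++ [e.1]), p.2.modify e.1 [] (· ++ [e.2.1]))
      else p)
      (PySem.Dict.empty, PySem.Dict.empty)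
  let rows := rc.1
  let cols := rc.2
  let rl : PySem.Dict Int (Int × Int) × PySem.Dict Int (Int × Int) :=
    (PySem.List.sorted (PySem.Dict.keys rows) (fun k => k) false).foldl (fun p y =>
      let xs := (rows.get? y).getD []   -- rows[y]: y is a key, so the default is never used
      (p.1.insert y ((PySem.List.min? xs (fun v => v)).getD 0, y),
       p.2.insert y ((PySem.List.max? xs (fun v => v)).getD 0, y)))
      (PySem.Dict.empty, PySem.Dict.empty)
  let ud : PySem.Dict Int (Int × Int) × PySem.Dict Int (Int × Int) :=
    (PySem.List.sorted (PySem.Dict.keys cols) (fun k => k) false).foldl (fun p x =>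
      let ys := (cols.get? x).getD []   -- cols[x]
      (p.1.insert x (x, (PySem.List.min? ys (fun v => v)).getD 0),
       p.2.insert x (x, (PySem.List.max? ys (fun v => v)).getD 0)))
      (PySem.Dict.empty, PySem.Dict.empty)
  (rl.1.items, rl.2.items, ud.1.items, ud.2.items)

-- ===== PRECONDITION & SPEC =====
def Spec_get_shortcuts (board : List (Int × Int × String)) (xm : Int) (ym : Int) (out : (List (Int × Int × Int)) × (List (Int × Int × Int)) × (List (Int × Int × Int)) × (List (Int × Int × Int))) : Prop := out = get_shortcuts_alt board xm ym
instance (board : List (Int × Int × String)) (xm : Int) (ym : Int) (out : (List (Int × Int × Int)) × (List (Int × Int × Int)) × (List (Int × Int × Int)) × (List (Int × Int × Int))) : Decidable (Spec_get_shortcuts board xm ym out) := by unfold Spec_get_shortcuts; infer_instance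

-- ===== CLAIM (what is proved, stated in full; the proofs are below) =====
def Claim_equal_get_shortcuts : Prop := ∀ (board : List (Int × Int × String)) (xm : Int) (ym : Int), Dom_get_shortcuts board xm ym → Spec_get_shortcuts board xm ym (get_shortcuts board xm ym)

-- ===== LEMMAS AND PROOFS =====

-- x's of occupied in-range cells of row y / y's of occupied in-range cells of column x
def rowXs (board : List (Int × Int × String)) (xm ym y : Int) : List Int :=
  (board.filter (fun e => pvInR xm ym e && e.2.1 == y)).map (fun e => e.1)
def colYs (board : List (Int × Int × String)) (xm ym x : Int) : List Int :=
  (board.filter (fun e => pvInR xm ym e && e.1 == x)).map (fun e => e.2.1)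

-- A's inner scan leaves the dict unchanged once the key is set
theorem innerA_frozen (M : List Int) (d : PySem.Dict Int (Int × Int)) (k : Int)
    (p : Int → Bool) (v : Int → Int × Int) (h : (PySem.Dict.get? d k).isSome) :
    M.foldl (fun d m => if p m && (PySem.Dict.get? d k).isNone then PySem.Dict.insert d k (v m) else d) d = d := by
  have hn : (PySem.Dict.get? d k).isNone = false := by
    cases hk : PySem.Dict.get? d k
    · rw [hk] at h; simp at h
    · rfl
  induction M with
  | nil => rfl
  | cons a t ih =>
    simp only [List.foldl_cons]
    rw [if_neg (by simp [hn]), ih]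

-- A's inner scan = first hit
theorem innerA_find (M : List Int) (d : PySem.Dict Int (Int × Int)) (k : Int)
    (p : Int → Bool) (v : Int → Int × Int) (h : PySem.Dict.get? d k = none) :
    M.foldl (fun d m => if p m && (PySem.Dict.get? d k).isNone then PySem.Dict.insert d k (v m) else d) d
      = match M.find? p with
        | some m => PySem.Dict.insert d k (v m)
        | none => d := by
  induction M with
  | nil => rfl
  | cons a t ih =>
    simp only [List.foldl_cons]
    by_cases hp : p a
    · rw [List.find?_cons_of_pos hp, if_pos (by simp [hp, h])]
      exact innerA_frozen t _ k p v (by simp [PySem.Dict.get?_insert_self])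
    · rw [List.find?_cons_of_neg (by simp [hp]), if_neg (by simp [hp])]
      exact ih

-- A's outer loop over distinct fresh keys collects the hits in key order
theorem outerA (M : List Int) (p : Int → Int → Bool) (v : Int → Int → Int × Int) :
    ∀ (L : List Int) (d : PySem.Dict Int (Int × Int)), L.Nodup → (∀ k ∈ L, PySem.Dict.get? d k = none) →
    (L.foldl (fun d k =>
        M.foldl (fun d m => if p k m && (PySem.Dict.get? d k).isNone then PySem.Dict.insert d k (v k m) else d) d) d).items
      = d.items ++ L.filterMap (fun k => (M.find? (p k)).map (fun m => (k, v k m))) := by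
  intro L
  induction L with
  | nil => simp
  | cons k t ih =>
    intro d hnd hfresh
    simp only [List.foldl_cons, List.filterMap_cons]
    rw [innerA_find M d k (p k) (v k) (hfresh k (by simp))]
    cases hf : M.find? (p k) with
    | none =>
      simpa using ih d hnd.of_cons (fun k' hk' => hfresh k' (by simp [hk']))
    | some m =>
      have hne : ∀ k' ∈ t, PySem.Dict.get? (PySem.Dict.insert d k (v k m)) k' = none := by
        intro k' hk'
        rw [PySem.Dict.get?_insert_of_ne _ _ (by rintro rfl; exact (List.nodup_cons.1 hnd).1 hk')]
        exact hfresh k' (by simp [hk'])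
      rw [ih _ hnd.of_cons hne,
          PySem.Dict.items_insert_of_not_contains _ _
            (by rw [PySem.Dict.contains_eq_isSome_get?, hfresh k (by simp)]; rfl)]
      simp

theorem min?_congr_mem (xs ys : List Int) (h : ∀ a, a ∈ xs ↔ a ∈ ys) :
    PySem.List.min? xs (fun v => v) = PySem.List.min? ys (fun v => v) := by
  cases hx : PySem.List.min? xs (fun v => v) with
  | none =>
    rw [PySem.List.min?_eq_none_iff] at hx
    cases hy : PySem.List.min? ys (fun v => v) with
    | none => rfl
    | some m => exact absurd ((h m).2 (PySem.List.min?_mem hy)) (by simp [hx])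
  | some m =>
    cases hy : PySem.List.min? ys (fun v => v) with
    | none =>
      rw [PySem.List.min?_eq_none_iff] at hy
      exact absurd ((h m).1 (PySem.List.min?_mem hx)) (by simp [hy])
    | some m' =>
      have h1 := PySem.List.min?_isMin hx m' ((h m').2 (PySem.List.min?_mem hy))
      have h2 := PySem.List.min?_isMin hy m ((h m).1 (PySem.List.min?_mem hx))
      simp only [le_antisymm h1 h2]

theorem max?_congr_mem (xs ys : List Int) (h : ∀ a, a ∈ xs ↔ a ∈ ys) :
    PySem.List.max? xs (fun v => v) = PySem.List.max? ys (fun v => v) := by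
  cases hx : PySem.List.max? xs (fun v => v) with
  | none =>
    rw [PySem.List.max?_eq_none_iff] at hx
    cases hy : PySem.List.max? ys (fun v => v) with
    | none => rfl
    | some m => exact absurd ((h m).2 (PySem.List.max?_mem hy)) (by simp [hx])
  | some m =>
    cases hy : PySem.List.max? ys (fun v => v) with
    | none =>
      rw [PySem.List.max?_eq_none_iff] at hy
      exact absurd ((h m).1 (PySem.List.max?_mem hx)) (by simp [hy])
    | some m' =>
      have h1 := PySem.List.max?_isMax hx m' ((h m').2 (PySem.List.max?_mem hy))
      have h2 := PySem.List.max?_isMax hy m ((h m).1 (PySem.List.max?_mem hx))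
      simp only [le_antisymm h2 h1]

-- first hit of an ascending scan is the minimum of the hits
theorem find?_eq_min? (L : List Int) (p : Int → Bool) (hL : L.Pairwise (· < ·)) :
    L.find? p = PySem.List.min? (L.filter p) (fun v => v) := by
  induction L with
  | nil => rfl
  | cons a t ih =>
    rw [List.pairwise_cons] at hL
    by_cases hp : p a
    · rw [List.find?_cons_of_pos hp, List.filter_cons_of_pos hp]
      cases hm : PySem.List.min? (a :: t.filter p) (fun v => v) with
      | none => simp [PySem.List.min?_eq_none_iff] at hm
      | some m =>
        have h1 := PySem.List.min?_isMin hm a (by simp)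
        have hmem := PySem.List.min?_mem hm
        have h2 : a ≤ m := by
          rcases List.mem_cons.1 hmem with rfl | hmt
          · exact le_refl _
          · exact le_of_lt (hL.1 m (List.mem_of_mem_filter hmt))
        simp [le_antisymm h1 h2]
    · rw [List.find?_cons_of_neg (by simp [hp]), List.filter_cons_of_neg (by simp [hp]), ih hL.2]

-- first hit of a descending scan is the maximum of the hits
theorem find?_eq_max? (L : List Int) (p : Int → Bool) (hL : L.Pairwise (· > ·)) :
    L.find? p = PySem.List.max? (L.filter p) (fun v => v) := by
  induction L with
  | nil => rfl
  | cons a t ih =>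
    rw [List.pairwise_cons] at hL
    by_cases hp : p a
    · rw [List.find?_cons_of_pos hp, List.filter_cons_of_pos hp]
      cases hm : PySem.List.max? (a :: t.filter p) (fun v => v) with
      | none => simp [PySem.List.max?_eq_none_iff] at hm
      | some m =>
        have h1 := PySem.List.max?_isMax hm a (by simp)
        have hmem := PySem.List.max?_mem hm
        have h2 : m ≤ a := by
          rcases List.mem_cons.1 hmem with rfl | hmt
          · exact le_refl _
          · exact le_of_lt (hL.1 m (List.mem_of_mem_filter hmt))
        simp [le_antisymm h2 h1]
    · rw [List.find?_cons_of_neg (by simp [hp]), List.filter_cons_of_neg (by simp [hp]), ih hL.2]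

theorem pvOcc_iff (board : List (Int × Int × String)) (x y : Int) :
    pvOcc board x y = true ↔ ∃ e ∈ board, e.1 = x ∧ e.2.1 = y := by
  simp [pvOcc, List.find?_isSome]

theorem pvInR_iff (xm ym : Int) (e : Int × Int × String) :
    pvInR xm ym e = true ↔ 0 ≤ e.1 ∧ e.1 < xm ∧ 0 ≤ e.2.1 ∧ e.2.1 < ym := by
  simp [pvInR]; tauto

theorem mem_rowXs (board : List (Int × Int × String)) (xm ym y a : Int) :
    a ∈ rowXs board xm ym y ↔ ∃ e ∈ board, e.1 = a ∧ e.2.1 = y ∧ pvInR xm ym e := by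
  simp only [rowXs, List.mem_map, List.mem_filter, Bool.and_eq_true, beq_iff_eq]
  constructor
  · rintro ⟨e, ⟨he, hr, hy⟩, rfl⟩; exact ⟨e, he, rfl, hy, hr⟩
  · rintro ⟨e, he, rfl, hy, hr⟩; exact ⟨e, ⟨he, hr, hy⟩, rfl⟩

theorem mem_colYs (board : List (Int × Int × String)) (xm ym x a : Int) :
    a ∈ colYs board xm ym x ↔ ∃ e ∈ board, e.1 = x ∧ e.2.1 = a ∧ pvInR xm ym e := by
  simp only [colYs, List.mem_map, List.mem_filter, Bool.and_eq_true, beq_iff_eq]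
  constructor
  · rintro ⟨e, ⟨he, hr, hx⟩, rfl⟩; exact ⟨e, he, hx, rfl, hr⟩
  · rintro ⟨e, he, hx, rfl, hr⟩; exact ⟨e, ⟨he, hr, hx⟩, rfl⟩

-- the occupied x's of row y (y in range) have the same members as rowXs
theorem mem_filter_pyRange_row (board : List (Int × Int × String)) (xm ym y : Int)
    (hy : 0 ≤ y ∧ y < ym) (a : Int) :
    a ∈ (PySem.List.pyRange 0 xm 1).filter (fun x => pvOcc board x y) ↔ a ∈ rowXs board xm ym y := by
  rw [List.mem_filter, mem_rowXs, PySem.List.mem_pyRange_one, pvOcc_iff]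
  constructor
  · rintro ⟨⟨h0, hxm⟩, e, he, rfl, rfl⟩
    exact ⟨e, he, rfl, rfl, (pvInR_iff xm ym e).2 ⟨h0, hxm, hy⟩⟩
  · rintro ⟨e, he, rfl, hy', hr⟩
    obtain ⟨h0, hxm, -⟩ := (pvInR_iff xm ym e).1 hr
    exact ⟨⟨h0, hxm⟩, e, he, rfl, hy'⟩

theorem mem_filter_pyRange_col (board : List (Int × Int × String)) (xm ym x : Int)
    (hx : 0 ≤ x ∧ x < xm) (a : Int) :
    a ∈ (PySem.List.pyRange 0 ym 1).filter (fun y => pvOcc board x y) ↔ a ∈ colYs board xm ym x := by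
  rw [List.mem_filter, mem_colYs, PySem.List.mem_pyRange_one, pvOcc_iff]
  constructor
  · rintro ⟨⟨h0, hym⟩, e, he, rfl, rfl⟩
    exact ⟨e, he, rfl, rfl, (pvInR_iff xm ym e).2 ⟨hx.1, hx.2, h0, hym⟩⟩
  · rintro ⟨e, he, hx', rfl, hr⟩
    obtain ⟨-, -, h0, hym⟩ := (pvInR_iff xm ym e).1 hr
    exact ⟨⟨h0, hym⟩, e, he, hx', rfl⟩

-- A's per-line first hit = extremum of the line's occupied coordinates
theorem row_find_min (board : List (Int × Int × String)) (xm ym y : Int) (hy : 0 ≤ y ∧ y < ym) :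
    (PySem.List.pyRange 0 xm 1).find? (fun x => pvOcc board x y)
      = PySem.List.min? (rowXs board xm ym y) (fun v => v) := by
  rw [find?_eq_min? _ _ (PySem.List.pairwise_lt_pyRange_one 0 xm)]
  exact min?_congr_mem _ _ (mem_filter_pyRange_row board xm ym y hy)

theorem row_find_max (board : List (Int × Int × String)) (xm ym y : Int) (hy : 0 ≤ y ∧ y < ym) :
    ((PySem.List.pyRange 0 xm 1).reverse).find? (fun x => pvOcc board x y)
      = PySem.List.max? (rowXs board xm ym y) (fun v => v) := by
  rw [find?_eq_max? _ _ (by rw [List.pairwise_reverse]; exact PySem.List.pairwise_lt_pyRange_one 0 xm)]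
  refine max?_congr_mem _ _ (fun a => ?_)
  rw [← mem_filter_pyRange_row board xm ym y hy a, List.filter_reverse, List.mem_reverse]

theorem col_find_min (board : List (Int × Int × String)) (xm ym x : Int) (hx : 0 ≤ x ∧ x < xm) :
    (PySem.List.pyRange 0 ym 1).find? (fun y => pvOcc board x y)
      = PySem.List.min? (colYs board xm ym x) (fun v => v) := by
  rw [find?_eq_min? _ _ (PySem.List.pairwise_lt_pyRange_one 0 ym)]
  exact min?_congr_mem _ _ (mem_filter_pyRange_col board xm ym x hx)

theorem col_find_max (board : List (Int × Int × String)) (xm ym x : Int) (hx : 0 ≤ x ∧ x < xm) :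
    ((PySem.List.pyRange 0 ym 1).reverse).find? (fun y => pvOcc board x y)
      = PySem.List.max? (colYs board xm ym x) (fun v => v) := by
  rw [find?_eq_max? _ _ (by rw [List.pairwise_reverse]; exact PySem.List.pairwise_lt_pyRange_one 0 ym)]
  refine max?_congr_mem _ _ (fun a => ?_)
  rw [← mem_filter_pyRange_col board xm ym x hx a, List.filter_reverse, List.mem_reverse]

-- assembly: a filterMap by an extremum-valued function = map over the nonempty lines
theorem filterMap_eq_map_filter {α : Type} (L : List Int) (F E : Int → Option Int)
    (g : Int → List Int) (m : Int → Int → α)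
    (h : ∀ y ∈ L, F y = E y ∧ (E y = none ↔ g y = [])) :
    L.filterMap (fun y => (F y).map (fun v => m y v))
      = (L.filter (fun y => !(g y).isEmpty)).map (fun y => m y ((E y).getD 0)) := by
  induction L with
  | nil => rfl
  | cons a t ih =>
    have ha := h a (by simp)
    rw [List.filterMap_cons]
    cases he : E a with
    | none =>
      have hg : g a = [] := (ha.2).1 he
      rw [ha.1, he, List.filter_cons_of_neg (by simp [hg])]
      exact ih (fun y hy => h y (by simp [hy]))
    | some v =>
      have hg : ¬ g a = [] := fun hg => by rw [(ha.2).2 hg] at he; exact absurd he (by simp)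
      rw [ha.1, List.filter_cons_of_pos (by simpa [List.isEmpty_iff] using hg), List.map_cons, he]
      simp only [Option.map_some]
      congr 1
      exact ih (fun y hy => h y (by simp [hy]))

-- ===== B side =====

-- a fold with two independent accumulators behind one guard splits componentwise
theorem groupFold_split (board : List (Int × Int × String)) (xm ym : Int) :
    board.foldl (fun (p : PySem.Dict Int (List Int) × PySem.Dict Int (List Int)) e =>
      if pvInR xm ym e then
        (p.1.modify e.2.1 [] (· ++ [e.1]), p.2.modify e.1 [] (· ++ [e.2.1]))
      else p) (PySem.Dict.empty, PySem.Dict.empty)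
    = (board.foldl (fun d e => if pvInR xm ym e then PySem.Dict.modify d e.2.1 [] (· ++ [e.1]) else d) PySem.Dict.empty,
       board.foldl (fun d e => if pvInR xm ym e then PySem.Dict.modify d e.1 [] (· ++ [e.2.1]) else d) PySem.Dict.empty) := by
  rw [show (fun (p : PySem.Dict Int (List Int) × PySem.Dict Int (List Int)) (e : Int × Int × String) =>
        if pvInR xm ym e then
          (p.1.modify e.2.1 [] (· ++ [e.1]), p.2.modify e.1 [] (· ++ [e.2.1]))
        else p)
      = (fun p e => ((fun d e => if pvInR xm ym e then PySem.Dict.modify d e.2.1 [] (· ++ [e.1]) else d) p.1 e,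
                     (fun d e => if pvInR xm ym e then PySem.Dict.modify d e.1 [] (· ++ [e.2.1]) else d) p.2 e))
      from by funext p e; by_cases h : pvInR xm ym e <;> simp [h]]
  exact PySem.List.foldl_prod_mk
    (fun d e => if pvInR xm ym e then PySem.Dict.modify d e.2.1 [] (· ++ [e.1]) else d)
    (fun d e => if pvInR xm ym e then PySem.Dict.modify d e.1 [] (· ++ [e.2.1]) else d)
    board PySem.Dict.empty PySem.Dict.empty

theorem rows_content_aux (board : List (Int × Int × String)) (xm ym y : Int) :
    ∀ d : PySem.Dict Int (List Int),
    (board.foldl (fun d e => if pvInR xm ym e then PySem.Dict.modify d e.2.1 [] (· ++ [e.1]) else d) d).getD y []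
      = d.getD y [] ++ rowXs board xm ym y := by
  induction board with
  | nil => intro d; simp [rowXs]
  | cons e t ih =>
    intro d
    simp only [List.foldl_cons, rowXs, List.filter_cons]
    by_cases hr : pvInR xm ym e
    · rw [if_pos hr]
      by_cases hy : e.2.1 = y
      · subst hy
        simp only [hr, beq_self_eq_true, Bool.and_true, if_pos, List.map_cons]
        rw [ih, PySem.Dict.getD_modify_self]
        simp [rowXs]
      · have hby : (e.2.1 == y) = false := by simp [hy]
        simp only [hr, hby, Bool.and_false]
        rw [ih, PySem.Dict.getD_modify_of_ne _ _ _ (fun hh => hy hh.symm)]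
        simp [rowXs]
    · have hbr : pvInR xm ym e = false := by simpa using hr
      simp only [hbr, Bool.false_and, ih]
      simp [rowXs]

theorem cols_content_aux (board : List (Int × Int × String)) (xm ym x : Int) :
    ∀ d : PySem.Dict Int (List Int),
    (board.foldl (fun d e => if pvInR xm ym e then PySem.Dict.modify d e.1 [] (· ++ [e.2.1]) else d) d).getD x []
      = d.getD x [] ++ colYs board xm ym x := by
  induction board with
  | nil => intro d; simp [colYs]
  | cons e t ih =>
    intro d
    simp only [List.foldl_cons, colYs, List.filter_cons]
    by_cases hr : pvInR xm ym e
    · rw [if_pos hr]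
      by_cases hx : e.1 = x
      · subst hx
        simp only [hr, beq_self_eq_true, Bool.and_true, if_pos, List.map_cons]
        rw [ih, PySem.Dict.getD_modify_self]
        simp [colYs]
      · have hbx : (e.1 == x) = false := by simp [hx]
        simp only [hr, hbx, Bool.and_false]
        rw [ih, PySem.Dict.getD_modify_of_ne _ _ _ (fun hh => hx hh.symm)]
        simp [colYs]
    · have hbr : pvInR xm ym e = false := by simpa using hr
      simp only [hbr, Bool.false_and, ih]
      simp [colYs]

theorem rows_content (board : List (Int × Int × String)) (xm ym y : Int) :
    (board.foldl (fun d e => if pvInR xm ym e then PySem.Dict.modify d e.2.1 [] (· ++ [e.1]) else d)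
        (PySem.Dict.empty : PySem.Dict Int (List Int))).getD y []
      = rowXs board xm ym y := by
  rw [rows_content_aux, PySem.Dict.getD_empty]; rfl

theorem cols_content (board : List (Int × Int × String)) (xm ym x : Int) :
    (board.foldl (fun d e => if pvInR xm ym e then PySem.Dict.modify d e.1 [] (· ++ [e.2.1]) else d)
        (PySem.Dict.empty : PySem.Dict Int (List Int))).getD x []
      = colYs board xm ym x := by
  rw [cols_content_aux, PySem.Dict.getD_empty]; rfl

theorem rows_keys (board : List (Int × Int × String)) (xm ym : Int) :
    (board.foldl (fun d e => if pvInR xm ym e then PySem.Dict.modify d e.2.1 [] (· ++ [e.1]) else d)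
        (PySem.Dict.empty : PySem.Dict Int (List Int))).keys
      = PySem.Set.ofList ((board.filter (pvInR xm ym)).map (fun e => e.2.1)) := by
  rw [← List.foldl_filter]
  exact PySem.Dict.keys_foldl_modify_key (board.filter (pvInR xm ym))
    (fun e => e.2.1) [] (fun _ e l => l ++ [e.1]) PySem.Dict.empty

theorem cols_keys (board : List (Int × Int × String)) (xm ym : Int) :
    (board.foldl (fun d e => if pvInR xm ym e then PySem.Dict.modify d e.1 [] (· ++ [e.2.1]) else d)
        (PySem.Dict.empty : PySem.Dict Int (List Int))).keys
      = PySem.Set.ofList ((board.filter (pvInR xm ym)).map (fun e => e.1)) := by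
  rw [← List.foldl_filter]
  exact PySem.Dict.keys_foldl_modify_key (board.filter (pvInR xm ym))
    (fun e => e.1) [] (fun _ e l => l ++ [e.2.1]) PySem.Dict.empty

-- sorted(rows) is exactly the in-range row indices with an occupied cell, ascending
theorem sorted_rows_keys (board : List (Int × Int × String)) (xm ym : Int) :
    PySem.List.sorted (PySem.Set.ofList ((board.filter (pvInR xm ym)).map (fun e => e.2.1))) (fun k => k) false
      = (PySem.List.pyRange 0 ym 1).filter (fun y => !(rowXs board xm ym y).isEmpty) := by
  apply PySem.List.sorted_eq_of_perm_of_pairwise_lt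
  · apply (List.perm_ext_iff_of_nodup ((PySem.List.nodup_pyRange_one 0 ym).filter _) (PySem.Set.nodup_ofList _)).2
    intro a
    rw [List.mem_filter, PySem.Set.mem_ofList, List.mem_map, PySem.List.mem_pyRange_one]
    constructor
    · rintro ⟨⟨h0, hym⟩, hne⟩
      rcases List.exists_mem_of_ne_nil _ (by simpa [List.isEmpty_iff] using hne) with ⟨w, hw⟩
      rcases (mem_rowXs board xm ym a w).1 hw with ⟨e, he, -, hy, hr⟩
      exact ⟨e, List.mem_filter.2 ⟨he, hr⟩, hy⟩
    · rintro ⟨e, he, rfl⟩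
      rcases List.mem_filter.1 he with ⟨hb, hr⟩
      obtain ⟨-, -, h0, hym⟩ := (pvInR_iff xm ym e).1 hr
      refine ⟨⟨h0, hym⟩, ?_⟩
      simp only [Bool.not_eq_eq_eq_not, Bool.not_true, List.isEmpty_eq_false_iff, ne_eq]
      intro hnil
      exact (by simp [hnil] : e.1 ∉ rowXs board xm ym e.2.1)
        ((mem_rowXs board xm ym e.2.1 e.1).2 ⟨e, hb, rfl, rfl, hr⟩)
  · exact (PySem.List.pairwise_lt_pyRange_one 0 ym).filter _

theorem sorted_cols_keys (board : List (Int × Int × String)) (xm ym : Int) :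
    PySem.List.sorted (PySem.Set.ofList ((board.filter (pvInR xm ym)).map (fun e => e.1))) (fun k => k) false
      = (PySem.List.pyRange 0 xm 1).filter (fun x => !(colYs board xm ym x).isEmpty) := by
  apply PySem.List.sorted_eq_of_perm_of_pairwise_lt
  · apply (List.perm_ext_iff_of_nodup ((PySem.List.nodup_pyRange_one 0 xm).filter _) (PySem.Set.nodup_ofList _)).2
    intro a
    rw [List.mem_filter, PySem.Set.mem_ofList, List.mem_map, PySem.List.mem_pyRange_one]
    constructor
    · rintro ⟨⟨h0, hxm⟩, hne⟩
      rcases List.exists_mem_of_ne_nil _ (by simpa [List.isEmpty_iff] using hne) with ⟨w, hw⟩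
      rcases (mem_colYs board xm ym a w).1 hw with ⟨e, he, hx, -, hr⟩
      exact ⟨e, List.mem_filter.2 ⟨he, hr⟩, hx⟩
    · rintro ⟨e, he, rfl⟩
      rcases List.mem_filter.1 he with ⟨hb, hr⟩
      obtain ⟨h0, hxm, -, -⟩ := (pvInR_iff xm ym e).1 hr
      refine ⟨⟨h0, hxm⟩, ?_⟩
      simp only [Bool.not_eq_eq_eq_not, Bool.not_true, List.isEmpty_eq_false_iff, ne_eq]
      intro hnil
      exact (by simp [hnil] : e.2.1 ∉ colYs board xm ym e.1)
        ((mem_colYs board xm ym e.1 e.2.1).2 ⟨e, hb, rfl, rfl, hr⟩)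
  · exact (PySem.List.pairwise_lt_pyRange_one 0 xm).filter _

-- B's emit loop: two independent accumulators, fresh distinct keys append
theorem emitB_split (L : List Int) (f g : Int → Int × Int) :
    L.foldl (fun (p : PySem.Dict Int (Int × Int) × PySem.Dict Int (Int × Int)) k =>
        (p.1.insert k (f k), p.2.insert k (g k))) (PySem.Dict.empty, PySem.Dict.empty)
      = (L.foldl (fun d k => PySem.Dict.insert d k (f k)) PySem.Dict.empty,
         L.foldl (fun d k => PySem.Dict.insert d k (g k)) PySem.Dict.empty) :=
  PySem.List.foldl_prod_mk (fun d k => PySem.Dict.insert d k (f k))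
    (fun d k => PySem.Dict.insert d k (g k)) L PySem.Dict.empty PySem.Dict.empty

theorem emitB_items (L : List Int) (f : Int → Int × Int) (hnd : L.Nodup) :
    (L.foldl (fun d k => PySem.Dict.insert d k (f k)) (PySem.Dict.empty : PySem.Dict Int (Int × Int))).items
      = L.map (fun k => (k, f k)) := by
  have := PySem.Dict.items_foldl_insert_fresh L (fun k => k) f PySem.Dict.empty
    (fun a _ => PySem.Dict.contains_empty a) (by simpa using hnd)
  simpa using this

-- ===== main equation =====
theorem main_eq (board : List (Int × Int × String)) (xm ym : Int) :
    get_shortcuts board xm ym = get_shortcuts_alt board xm ym := by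
  simp only [get_shortcuts, get_shortcuts_alt]
  rw [groupFold_split]
  simp only []
  set rowsD := board.foldl (fun d e => if pvInR xm ym e then PySem.Dict.modify d e.2.1 [] (· ++ [e.1]) else d) (PySem.Dict.empty : PySem.Dict Int (List Int)) with hrows
  set colsD := board.foldl (fun d e => if pvInR xm ym e then PySem.Dict.modify d e.1 [] (· ++ [e.2.1]) else d) (PySem.Dict.empty : PySem.Dict Int (List Int)) with hcols
  have hKr : rowsD.keys = PySem.Set.ofList ((board.filter (pvInR xm ym)).map (fun e => e.2.1)) := by
    rw [hrows]; exact rows_keys board xm ym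
  have hKc : colsD.keys = PySem.Set.ofList ((board.filter (pvInR xm ym)).map (fun e => e.1)) := by
    rw [hcols]; exact cols_keys board xm ym
  have hCr : ∀ y, (rowsD.get? y).getD [] = rowXs board xm ym y := by
    intro y; rw [hrows]; exact rows_content board xm ym y
  have hCc : ∀ x, (colsD.get? x).getD [] = colYs board xm ym x := by
    intro x; rw [hcols]; exact cols_content board xm ym x
  have hndR : (PySem.List.sorted rowsD.keys (fun k => k) false).Nodup :=
    (PySem.List.sorted_perm rowsD.keys (fun k => k) false).symm.nodup
      (by rw [hKr]; exact PySem.Set.nodup_ofList _)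
  have hndC : (PySem.List.sorted colsD.keys (fun k => k) false).Nodup :=
    (PySem.List.sorted_perm colsD.keys (fun k => k) false).symm.nodup
      (by rw [hKc]; exact PySem.Set.nodup_ofList _)
  rw [emitB_split (PySem.List.sorted rowsD.keys (fun k => k) false)
        (fun y => ((PySem.List.min? ((rowsD.get? y).getD []) (fun v => v)).getD 0, y))
        (fun y => ((PySem.List.max? ((rowsD.get? y).getD []) (fun v => v)).getD 0, y)),
      emitB_split (PySem.List.sorted colsD.keys (fun k => k) false)
        (fun x => (x, (PySem.List.min? ((colsD.get? x).getD []) (fun v => v)).getD 0))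
        (fun x => (x, (PySem.List.max? ((colsD.get? x).getD []) (fun v => v)).getD 0))]
  rw [emitB_items _ _ hndR, emitB_items _ _ hndR, emitB_items _ _ hndC, emitB_items _ _ hndC]
  simp only [hCr, hCc]
  rw [hKr, hKc, sorted_rows_keys, sorted_cols_keys]
  -- A side
  have a1 := outerA (PySem.List.pyRange 0 xm 1) (fun y x => pvOcc board x y) (fun y x => (x, y))
    (PySem.List.pyRange 0 ym 1) PySem.Dict.empty (PySem.List.nodup_pyRange_one 0 ym)
    (fun k _ => PySem.Dict.get?_empty k)
  have a2 := outerA ((PySem.List.pyRange 0 xm 1).reverse) (fun y x => pvOcc board x y) (fun y x => (x, y))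
    (PySem.List.pyRange 0 ym 1) PySem.Dict.empty (PySem.List.nodup_pyRange_one 0 ym)
    (fun k _ => PySem.Dict.get?_empty k)
  have a3 := outerA (PySem.List.pyRange 0 ym 1) (fun x y => pvOcc board x y) (fun x y => (x, y))
    (PySem.List.pyRange 0 xm 1) PySem.Dict.empty (PySem.List.nodup_pyRange_one 0 xm)
    (fun k _ => PySem.Dict.get?_empty k)
  have a4 := outerA ((PySem.List.pyRange 0 ym 1).reverse) (fun x y => pvOcc board x y) (fun x y => (x, y))
    (PySem.List.pyRange 0 xm 1) PySem.Dict.empty (PySem.List.nodup_pyRange_one 0 xm)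
    (fun k _ => PySem.Dict.get?_empty k)
  rw [a1, a2, a3, a4]
  -- turn each filterMap into the B-shaped map over nonempty lines
  rw [filterMap_eq_map_filter (PySem.List.pyRange 0 ym 1) _
        (fun y => PySem.List.min? (rowXs board xm ym y) (fun v => v)) (rowXs board xm ym)
        (fun y v => (y, (v, y)))
        (fun y hy => ⟨row_find_min board xm ym y
            (by simpa using (PySem.List.mem_pyRange_one.1 hy)),
          PySem.List.min?_eq_none_iff _ _⟩),
      filterMap_eq_map_filter (PySem.List.pyRange 0 ym 1) _
        (fun y => PySem.List.max? (rowXs board xm ym y) (fun v => v)) (rowXs board xm ym)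
        (fun y v => (y, (v, y)))
        (fun y hy => ⟨row_find_max board xm ym y
            (by simpa using (PySem.List.mem_pyRange_one.1 hy)),
          PySem.List.max?_eq_none_iff _ _⟩),
      filterMap_eq_map_filter (PySem.List.pyRange 0 xm 1) _
        (fun x => PySem.List.min? (colYs board xm ym x) (fun v => v)) (colYs board xm ym)
        (fun x v => (x, (x, v)))
        (fun x hx => ⟨col_find_min board xm ym x
            (by simpa using (PySem.List.mem_pyRange_one.1 hx)),
          PySem.List.min?_eq_none_iff _ _⟩),
      filterMap_eq_map_filter (PySem.List.pyRange 0 xm 1) _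
        (fun x => PySem.List.max? (colYs board xm ym x) (fun v => v)) (colYs board xm ym)
        (fun x v => (x, (x, v)))
        (fun x hx => ⟨col_find_max board xm ym x
            (by simpa using (PySem.List.mem_pyRange_one.1 hx)),
          PySem.List.max?_eq_none_iff _ _⟩)]
  rfl

-- ===== VERDICT (by name: the statement is the Claim_ definition above) =====
theorem get_shortcuts_spec : Claim_equal_get_shortcuts := by
  intro board xm ym _
  unfold Spec_get_shortcuts
  exact main_eq board xm ym
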